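-- pv_equiv track=rewrite | github.com/jsbueno/advent_of_code_2024 | 2018/day_03.py | doit_part2
-- ===== SOURCE A (Python) =====
-- from collections import Counter
--
-- def doit_part2(patches):
--     occupied = Counter()
--     # already_counted = set()
--     used = 0
--     for rect in patches:
--         tiles = set(rect)
--         intersections = tiles.intersection(occupied)
--         occupied.update(tiles)
--         # intersections -= already_counted
--         # already_counted.update(intersections)
--         # used += len(intersections)
--     for rect in patches:
--         if all(occupied[coord] == 1 for coord in rect):
--             return rect
-- ===== SOURCE B (Python) =====
-- def doit_part2(patches):
--     for i, rect in enumerate(patches):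
--         tiles = set(rect)
--         if all(tiles.isdisjoint(other) for j, other in enumerate(patches) if j != i):
--             return rect
-- ===== Notes on version B (the rewrite author's own statement) =====
-- stated objective: alternative
-- what changed: Drops the global tile-occupancy Counter entirely: B brute-forces pairwise disjointness, returning the first patch whose tile set shares no coordinate with any other patch; no counting structure or first pass is built.
import Mathlib
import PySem

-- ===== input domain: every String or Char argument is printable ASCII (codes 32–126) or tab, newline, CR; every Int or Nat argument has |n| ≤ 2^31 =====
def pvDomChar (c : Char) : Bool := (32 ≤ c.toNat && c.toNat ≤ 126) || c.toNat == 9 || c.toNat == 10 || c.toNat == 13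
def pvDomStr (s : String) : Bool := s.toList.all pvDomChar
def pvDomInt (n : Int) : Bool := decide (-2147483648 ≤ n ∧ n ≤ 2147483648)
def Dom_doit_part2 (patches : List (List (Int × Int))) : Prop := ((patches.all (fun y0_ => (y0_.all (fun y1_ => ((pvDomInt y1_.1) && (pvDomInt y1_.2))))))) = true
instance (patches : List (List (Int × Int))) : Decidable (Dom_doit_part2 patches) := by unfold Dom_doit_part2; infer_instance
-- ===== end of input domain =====

-- B drops A's tile-occupancy Counter entirely and brute-forces pairwise disjointness:
-- return the first patch whose tile set shares no coordinate with any other patch (alternative algorithm, same result).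


-- ===== PORT A =====
def doit_part2 (patches : List (List (Int × Int))) : Option (List (Int × Int)) :=
  let occupied : PySem.Dict (Int × Int) Int :=
    patches.foldl (fun occupied rect =>
      let tiles : PySem.Set (Int × Int) := PySem.Set.ofList rect
      let _intersections : PySem.Set (Int × Int) := PySem.Set.inter tiles occupied.keys
      tiles.foldl (fun d c => d.modify c 0 (· + 1)) occupied) PySem.Dict.empty
  patches.find? (fun rect => rect.all (fun c => occupied.getD c 0 == 1))

-- ===== PORT B =====
def doit_part2_alt (patches : List (List (Int × Int))) : Option (List (Int × Int)) :=
  ((PySem.List.enumerate patches 0).find? (fun ir =>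
    let tiles : PySem.Set (Int × Int) := PySem.Set.ofList ir.2
    (PySem.List.enumerate patches 0).all (fun jo =>
      jo.1 == ir.1 || PySem.Set.isdisjoint tiles jo.2))).map (·.2)

-- ===== PRECONDITION & SPEC =====
def Spec_doit_part2 (patches : List (List (Int × Int))) (out : Option (List (Int × Int))) : Prop := out = doit_part2_alt patches
instance (patches : List (List (Int × Int))) (out : Option (List (Int × Int))) : Decidable (Spec_doit_part2 patches out) := by unfold Spec_doit_part2; infer_instance

-- ===== CLAIM (what is proved, stated in full; the proofs are below) =====
def Claim_equal_doit_part2 : Prop := ∀ (patches : List (List (Int × Int))), Dom_doit_part2 patches → Spec_doit_part2 patches (doit_part2 patches)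

-- ===== LEMMAS AND PROOFS =====

-- a fold of an inner fold over g r is a fold over the flattened list
theorem foldl_foldl_flatMap {α β γ : Type} (l : List α) (g : α → List β)
    (f : γ → β → γ) (init : γ) :
    l.foldl (fun acc r => (g r).foldl f acc) init = (l.flatMap g).foldl f init := by
  induction l generalizing init with
  | nil => rfl
  | cons r rs ih => simp [List.flatMap_cons, List.foldl_append, ih]

-- count of an element in the flattened deduped patches = number of patch occurrences containing it
theorem count_flatMap_ofList (patches : List (List (Int × Int))) (c : Int × Int) :
    (patches.flatMap (fun r => (PySem.Set.ofList r : List (Int × Int)))).count c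
      = patches.countP (fun r => decide (c ∈ r)) := by
  induction patches with
  | nil => rfl
  | cons r rs ih =>
    rw [List.flatMap_cons, List.count_append, List.countP_cons, ih]
    by_cases h : c ∈ r
    · have hm : c ∈ (PySem.Set.ofList r : List (Int × Int)) := (PySem.Set.mem_ofList _ _).mpr h
      rw [List.count_eq_one_of_mem (PySem.Set.nodup_ofList r) hm]
      simp [h, Nat.add_comm]
    · have hm : c ∉ (PySem.Set.ofList r : List (Int × Int)) :=
        fun hh => h ((PySem.Set.mem_ofList _ _).mp hh)
      rw [List.count_eq_zero_of_not_mem hm]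
      simp [h]

-- two distinct members satisfying p force countP ≥ 2
theorem two_mem_le_countP {α : Type} (p : α → Bool) {l : List α} {x y : α}
    (hx : x ∈ l) (hy : y ∈ l) (hxy : x ≠ y) (hpx : p x = true) (hpy : p y = true) :
    2 ≤ l.countP p := by
  induction l with
  | nil => cases hx
  | cons a l ih =>
    rw [List.countP_cons]
    rcases List.mem_cons.mp hx with rfl | hx'
    · rcases List.mem_cons.mp hy with rfl | hy'
      · exact absurd rfl hxy
      · have h1 : 0 < l.countP p := List.countP_pos_iff.mpr ⟨y, hy', hpy⟩
        rw [if_pos hpx]; omega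
    · rcases List.mem_cons.mp hy with rfl | hy'
      · have h1 : 0 < l.countP p := List.countP_pos_iff.mpr ⟨x, hx', hpx⟩
        rw [if_pos hpy]; omega
      · have := ih hx' hy'
        omega

-- a Nodup list whose only p-member is x has countP = 1
theorem countP_eq_one_of_unique {α : Type} (p : α → Bool) {l : List α} {x : α}
    (hnd : l.Nodup) (hx : x ∈ l) (hpx : p x = true) (huniq : ∀ y ∈ l, p y = true → y = x) :
    l.countP p = 1 := by
  induction l with
  | nil => cases hx
  | cons a l ih =>
    rw [List.countP_cons]
    rcases List.mem_cons.mp hx with rfl | hx'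
    · have h0 : l.countP p = 0 := by
        rw [List.countP_eq_zero]
        intro y hy hpy
        have := huniq y (List.mem_cons_of_mem _ hy) hpy
        subst this
        exact absurd hy (List.nodup_cons.mp hnd).1
      simp [h0, hpx]
    · have hpa : p a = false := by
        by_contra h
        have := huniq a (List.mem_cons_self ..) (by simpa using h)
        subst this
        exact (List.nodup_cons.mp hnd).1 hx'
      rw [ih (List.nodup_cons.mp hnd).2 hx'
        (fun y hy hpy => huniq y (List.mem_cons_of_mem _ hy) hpy)]
      simp [hpa]

-- pairwise-increasing first components make members with equal fst equal
theorem eq_of_pairwise_lt_fst {α : Type} {l : List (Int × α)} {a b : Int × α}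
    (hp : l.Pairwise (fun p q => p.1 < q.1)) (ha : a ∈ l) (hb : b ∈ l) (h1 : a.1 = b.1) :
    a = b := by
  induction l with
  | nil => cases ha
  | cons x t ih =>
    have hx := (List.pairwise_cons.mp hp).1
    rcases List.mem_cons.mp ha with rfl | ha'
    · rcases List.mem_cons.mp hb with rfl | hb'
      · rfl
      · exact absurd h1 (by have := hx b hb'; omega)
    · rcases List.mem_cons.mp hb with rfl | hb'
      · exact absurd h1 (by have := hx a ha'; omega)
      · exact ih (List.pairwise_cons.mp hp).2 ha' hb'

-- finding on the enumerate with a snd-only predicate is finding on the list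
theorem find?_enumerate_snd {α : Type} (xs : List α) (s : Int) (p : α → Bool) :
    ((PySem.List.enumerate xs s).find? (fun jo => p jo.2)).map (·.2) = xs.find? p := by
  induction xs generalizing s with
  | nil => rfl
  | cons x t ih =>
    rw [PySem.List.enumerate_cons, List.find?_cons, List.find?_cons]
    cases hp : p x
    · exact ih (s + 1)
    · rfl

-- find? respects pointwise-equal predicates on members
theorem find?_congr_mem {α : Type} (l : List α) (p q : α → Bool)
    (h : ∀ x ∈ l, p x = q x) : l.find? p = l.find? q := by
  induction l with
  | nil => rfl
  | cons a l ih =>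
    simp only [List.find?_cons, h a (by simp)]
    cases q a <;> simp [ih (fun x hx => h x (by simp [hx]))]

-- ===== VERDICT (by name: the statement is the Claim_ definition above) =====
theorem doit_part2_spec : Claim_equal_doit_part2 := by
  unfold Claim_equal_doit_part2
  intro patches _
  unfold Spec_doit_part2 doit_part2 doit_part2_alt
  simp only []
  rw [foldl_foldl_flatMap patches (fun r => (PySem.Set.ofList r : List (Int × Int)))
      (fun (d : PySem.Dict (Int × Int) Int) c => d.modify c 0 (· + 1)) PySem.Dict.empty]
  have hocc : ∀ c : Int × Int,
      ((patches.flatMap (fun r => (PySem.Set.ofList r : List (Int × Int)))).foldl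
        (fun d c => d.modify c 0 (· + 1)) PySem.Dict.empty).getD c 0
        = (patches.countP (fun r => decide (c ∈ r)) : Int) := by
    intro c
    rw [PySem.Dict.getD_foldl_modify_add_one]
    rw [count_flatMap_ofList]
    simp [PySem.Dict.getD_empty]
  set E := PySem.List.enumerate patches 0 with hE
  have hpw : E.Pairwise (fun p q => p.1 < q.1) := PySem.List.pairwise_lt_enumerate ..
  have hnd : E.Nodup := hpw.imp (fun h => by intro he; subst he; omega)
  have hcnt : ∀ p : List (Int × Int) → Bool,
      patches.countP p = E.countP (fun jo => p jo.2) := by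
    intro p
    conv_lhs => rw [← PySem.List.map_snd_enumerate patches 0]
    rw [List.countP_map]
    rfl
  -- pointwise: for each member (i, r) of the enumerate, B's predicate equals A's
  have hpoint : ∀ ir ∈ E,
      (E.all (fun jo => jo.1 == ir.1 || PySem.Set.isdisjoint (PySem.Set.ofList ir.2) jo.2))
        = (ir.2.all (fun c =>
            (patches.countP (fun r => decide (c ∈ r)) : Int) == 1)) := by
    intro ir hir
    apply Bool.eq_iff_iff.mpr
    simp only [List.all_eq_true, Bool.or_eq_true, beq_iff_eq]
    constructor
    · -- B's condition → each coord's count is 1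
      intro h c hc
      have hx : (fun jo : Int × List (Int × Int) => decide (c ∈ jo.2)) ir = true := by
        simpa using hc
      have h1 : E.countP (fun jo => decide (c ∈ jo.2)) = 1 := by
        apply countP_eq_one_of_unique _ hnd hir hx
        intro y hy hpy
        rcases h y hy with hji | hdis
        · exact eq_of_pairwise_lt_fst hpw hy hir hji
        · exfalso
          have := (PySem.Set.isdisjoint_iff _ _).mp hdis c ((PySem.Set.mem_ofList _ _).mpr hc)
          exact this (by simpa using hpy)
      have h2 : patches.countP (fun r => decide (c ∈ r))
          = E.countP (fun jo => decide (c ∈ jo.2)) := hcnt _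
      omega
    · -- each coord's count is 1 → B's condition
      intro h jo hjo
      by_cases hji : jo.1 = ir.1
      · exact Or.inl hji
      · right
        apply (PySem.Set.isdisjoint_iff _ _).mpr
        intro c hcs hco
        have hc : c ∈ ir.2 := (PySem.Set.mem_ofList _ _).mp hcs
        have h1 : (patches.countP (fun r => decide (c ∈ r)) : Int) = 1 := h c hc
        have hge : 2 ≤ E.countP (fun jo => decide (c ∈ jo.2)) := by
          apply two_mem_le_countP _ hir hjo
          · intro he; exact hji (by rw [he])
          · simpa using hc
          · simpa using hco
        have h2 : patches.countP (fun r => decide (c ∈ r))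
            = E.countP (fun jo => decide (c ∈ jo.2)) := hcnt _
        omega
  rw [find?_congr_mem E _ _ hpoint, hE,
    find?_enumerate_snd patches 0
      (fun r => r.all (fun c => ((patches.countP (fun r' => decide (c ∈ r')) : Int) == 1)))]
  apply Eq.symm
  apply find?_congr_mem
  intro rect _
  apply Bool.eq_iff_iff.mpr
  simp only [List.all_eq_true]
  constructor
  · intro h c hc
    rw [hocc c]
    exact h c hc
  · intro h c hc
    have hd := h c hc
    rw [hocc c] at hd
    exact hd
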